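-- pv_equiv track=rewrite | github.com/Liliputech/Oulipo | eodermdrome.py | is_eodermdrome
-- ===== SOURCE A (Python) =====
-- def is_eodermdrome(str=['']):
-- 	#Main eodermdrome detection algorithm
-- 	if(len(str)==11):
-- 		test=1
-- 		k=0
-- 		co=0
-- 		mem=[]
-- 		while(k<10 and test==1):
-- 			char1=str[k]
-- 			char2=str[k+1]
-- 			if(char1 not in mem):
-- 				mem.append(char1)
-- 				co=co+1
-- 			if(char2 not in mem):
-- 				mem.append(char2)
-- 				co=co+1
-- 			syl1=char1+char2
-- 			syl2=char2+char1
-- 			if(str.find(syl1,k+1)!=-1 or str.find(syl2,k+1)!=-1 or char1==char2 or co>5):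
-- 				test=0
-- 			else:
-- 				k=k+1
-- 		#endwhile
-- 	else:
-- 		test=0
-- 	return(test)
-- ===== SOURCE B (Python) =====
-- def is_eodermdrome(str=['']):
--     # Global check: no self-loop pair, all 10 undirected edges distinct, at most 5 vertices.
--     if len(str) != 11:
--         return 0
--     pairs = [(str[i], str[i + 1]) for i in range(10)]
--     if any(a == b for (a, b) in pairs):
--         return 0
--     if len({frozenset(p) for p in pairs}) != 10:
--         return 0
--     if len(set(str)) > 5:
--         return 0
--     return 1
-- ===== Notes on version B (the rewrite author's own statement) =====
-- stated objective: simpler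
-- what changed: A's stateful while-loop with str.find lookahead for repeated adjacent pairs and an incrementally counted vertex list is replaced by three global checks over the 10 adjacent pairs: no self-loop pair, all 10 undirected edges (frozensets) distinct, and at most 5 distinct characters.
import Mathlib
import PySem

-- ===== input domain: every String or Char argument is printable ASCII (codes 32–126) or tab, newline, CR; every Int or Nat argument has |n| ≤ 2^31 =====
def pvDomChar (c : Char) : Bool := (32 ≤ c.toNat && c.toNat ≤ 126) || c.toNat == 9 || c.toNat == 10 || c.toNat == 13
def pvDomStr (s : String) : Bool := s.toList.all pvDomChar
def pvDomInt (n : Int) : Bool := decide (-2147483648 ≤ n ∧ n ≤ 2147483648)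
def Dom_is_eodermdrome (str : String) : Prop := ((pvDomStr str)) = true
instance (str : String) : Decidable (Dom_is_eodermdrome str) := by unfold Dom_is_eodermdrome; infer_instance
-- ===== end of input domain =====

-- B replaces A's stateful scan with str.find lookahead by three global set-based checks: simpler.


-- ===== PORT A =====
-- the while loop; fuel 10 bounds the ≤ 10 body executions (k increments 0..9, a failing body is terminal)
def pvALoop (str : String) (fuel : Nat) (k test co : Int) (mem : List Char) : Int :=
  match fuel with
  | 0 => test
  | fuel + 1 =>
    if k < 10 ∧ test = 1 then
      let char1 := (PySem.Str.pyGet? str k).getD ' '        -- str[k]; k in range whenever the loop runs (len = 11), default unreachable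
      let char2 := (PySem.Str.pyGet? str (k + 1)).getD ' '  -- str[k+1]
      let mem1 := if char1 ∈ mem then mem else mem ++ [char1]
      let co1  := if char1 ∈ mem then co else co + 1
      let mem2 := if char2 ∈ mem1 then mem1 else mem1 ++ [char2]
      let co2  := if char2 ∈ mem1 then co1 else co1 + 1
      let syl1 := String.ofList [char1, char2]
      let syl2 := String.ofList [char2, char1]
      if PySem.Str.findFrom str syl1 (k + 1) none ≠ -1 ∨ PySem.Str.findFrom str syl2 (k + 1) none ≠ -1
          ∨ char1 = char2 ∨ co2 > 5 then
        pvALoop str fuel k 0 co2 mem2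
      else
        pvALoop str fuel (k + 1) 1 co2 mem2
    else test

def is_eodermdrome (str : String) : Int :=
  if PySem.Str.len str = 11 then
    pvALoop str 10 0 1 0 []
  else 0

-- ===== PORT B =====
-- frozenset {a, b} rendered as the canonical ordered pair
def pvNormEdge (a b : Char) : Char × Char := if a ≤ b then (a, b) else (b, a)

def is_eodermdrome_alt (str : String) : Int :=
  let cs := str.toList
  if cs.length ≠ 11 then 0
  else
    let pairs := (List.range 10).map (fun i => (cs.getD i ' ', cs.getD (i + 1) ' '))  -- indices provably in range
    if pairs.any (fun p => p.1 == p.2) then 0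
    else if (PySem.Set.ofList (pairs.map (fun p => pvNormEdge p.1 p.2))).length ≠ 10 then 0
    else if (PySem.Set.ofList cs).length > 5 then 0
    else 1

-- ===== PRECONDITION & SPEC =====
def Spec_is_eodermdrome (str : String) (out : Int) : Prop := out = is_eodermdrome_alt str
instance (str : String) (out : Int) : Decidable (Spec_is_eodermdrome str out) := by unfold Spec_is_eodermdrome; infer_instance

-- ===== CLAIM (what is proved, stated in full; the proofs are below) =====
def Claim_equal_is_eodermdrome : Prop := ∀ (str : String), Dom_is_eodermdrome str → Spec_is_eodermdrome str (is_eodermdrome str)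

-- ===== LEMMAS AND PROOFS =====

-- canonical views of the two programs' conditions (proof-only helpers)
def pvC (cs : List Char) (i : Nat) : Char := cs.getD i ' '
def pvEdge (cs : List Char) (i : Nat) : Char × Char := pvNormEdge (pvC cs i) (pvC cs (i + 1))
def pvCondA (cs : List Char) (j : Nat) : Bool :=
  decide ([pvC cs j, pvC cs (j + 1)] <:+: cs.drop (j + 1))
  || decide ([pvC cs (j + 1), pvC cs j] <:+: cs.drop (j + 1))
  || (pvC cs j == pvC cs (j + 1))
  || decide (((PySem.Set.ofList (cs.take (j + 2))).length : Int) > 5)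
def pvB1 (cs : List Char) : Bool := (List.range 10).all fun j => !(pvC cs j == pvC cs (j + 1))
def pvB2 (cs : List Char) : Bool := decide ((PySem.Set.ofList ((List.range 10).map (pvEdge cs))).length = 10)
def pvB3 (cs : List Char) : Bool := decide ((PySem.Set.ofList cs).length ≤ 5)

theorem pvALoop_test0 (str : String) (fuel : Nat) (k co : Int) (mem : List Char) :
    pvALoop str fuel k 0 co mem = 0 := by
  cases fuel <;> simp [pvALoop]

-- L1: building the prefix dedup one element at a time
theorem pv_ofList_take_succ (cs : List Char) (j : Nat) (h : j < cs.length) :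
    PySem.Set.ofList (cs.take (j + 1)) = PySem.Set.add (PySem.Set.ofList (cs.take j)) (cs.getD j ' ') := by
  rw [List.take_add_one, List.getElem?_eq_getElem h]
  simp only [Option.toList_some]
  rw [PySem.Set.ofList_append_singleton, List.getD_eq_getElem cs ' ' h]

-- L2: set(xs) is a sublist of xs
theorem pv_ofList_sublist {α : Type} [BEq α] [LawfulBEq α] (xs : List α) :
    (PySem.Set.ofList xs).Sublist xs := by
  induction xs using List.reverseRecOn with
  | nil => simp [PySem.Set.ofList_nil]
  | append_singleton ys y ih =>
    rw [PySem.Set.ofList_append_singleton, PySem.Set.add_eq_ite]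
    split
    · exact ih.trans (List.sublist_append_left ys [y])
    · exact List.Sublist.append ih (List.Sublist.refl [y])

-- L3: len(set(xs)) = len(xs) iff xs has no duplicates
theorem pv_length_ofList_eq_iff {α : Type} [BEq α] [LawfulBEq α] (xs : List α) :
    (PySem.Set.ofList xs).length = xs.length ↔ xs.Nodup := by
  constructor
  · intro h
    have := (pv_ofList_sublist xs).eq_of_length h
    rw [← this]
    exact PySem.Set.nodup_ofList xs
  · intro h
    rw [PySem.Set.ofList_eq_self_of_nodup _ h]

-- L4: a prefix's dedup is no longer than the whole list's
theorem pv_length_ofList_take_le (cs : List Char) (t : Nat) :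
    (PySem.Set.ofList (cs.take t)).length ≤ (PySem.Set.ofList cs).length := by
  conv_rhs => rw [← List.take_append_drop t cs]
  rw [PySem.Set.ofList_append, PySem.Set.update_eq_append_filter, List.length_append]
  omega

-- L5: equality of canonical unordered pairs
theorem pvNormEdge_eq_iff (a b x y : Char) :
    pvNormEdge a b = pvNormEdge x y ↔ (a = x ∧ b = y) ∨ (a = y ∧ b = x) := by
  unfold pvNormEdge
  split_ifs with h1 h2 h2 <;> simp only [Prod.mk.injEq] <;> constructor
  · exact Or.inl
  · rintro (h | ⟨hay, hbx⟩)
    · exact h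
    · subst hay; subst hbx
      have := le_antisymm h1 h2
      exact ⟨this, this.symm⟩
  · exact fun h => Or.inr h
  · rintro (⟨hax, hby⟩ | h)
    · subst hax; subst hby
      exact absurd h1 h2
    · exact h
  · rintro ⟨hbx, hay⟩; exact Or.inr ⟨hay, hbx⟩
  · rintro (⟨hax, hby⟩ | ⟨hay, hbx⟩)
    · subst hax; subst hby
      exact absurd h2 h1
    · exact ⟨hbx, hay⟩
  · rintro ⟨hby, hax⟩; exact Or.inl ⟨hax, hby⟩
  · rintro (⟨hax, hby⟩ | ⟨hay, hbx⟩)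
    · exact ⟨hby, hax⟩
    · subst hay; subst hbx
      rcases le_total a b with h | h
      · exact absurd h h1
      · exact absurd h h2

-- two-char prefix of a drop
theorem pv_two_prefix_iff (cs : List Char) (x y : Char) (m : Nat) :
    ([x, y] <+: cs.drop m) ↔ m + 1 < cs.length ∧ pvC cs m = x ∧ pvC cs (m + 1) = y := by
  constructor
  · rintro ⟨t, ht⟩
    have hlen : cs.length - m = t.length + 2 := by
      have := congrArg List.length ht
      simpa using this.symm
    have hm : m + 1 < cs.length := by omega
    have hx : cs[m]? = some x := by
      have h0 : (cs.drop m)[0]? = some x := by rw [← ht]; rfl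
      rw [List.getElem?_drop] at h0
      simpa using h0
    have hy : cs[m + 1]? = some y := by
      have h0 : (cs.drop m)[1]? = some y := by rw [← ht]; rfl
      rw [List.getElem?_drop] at h0
      simpa using h0
    exact ⟨hm, by simp [pvC, List.getD_eq_getElem?_getD, hx], by simp [pvC, List.getD_eq_getElem?_getD, hy]⟩
  · rintro ⟨hm, hx, hy⟩
    have h1 : m < cs.length := by omega
    have e1 : cs.drop m = cs[m] :: cs.drop (m + 1) := List.drop_eq_getElem_cons h1
    have e2 : cs.drop (m + 1) = cs[m + 1] :: cs.drop (m + 2) := List.drop_eq_getElem_cons hm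
    refine ⟨cs.drop (m + 2), ?_⟩
    rw [e1, e2]
    simp only [pvC, List.getD_eq_getElem cs ' ' h1, List.getD_eq_getElem cs ' ' hm] at hx hy
    simp [hx, hy]

-- L6: a two-character infix of a drop is an adjacent pair further right
theorem pv_two_infix_iff (cs : List Char) (x y : Char) (k : Nat) :
    ([x, y] <:+: cs.drop k) ↔ ∃ p, k ≤ p ∧ p + 1 < cs.length ∧ pvC cs p = x ∧ pvC cs (p + 1) = y := by
  rw [← PySem.Chars.isIn_iff_infix, ← PySem.Chars.exists_prefix_drop_iff_isIn]
  constructor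
  · rintro ⟨j, hj⟩
    rw [List.drop_drop] at hj
    rcases pv_two_prefix_iff cs x y (k + j) |>.mp (by simpa [Nat.add_comm] using hj) with ⟨hlt, hx, hy⟩
    exact ⟨k + j, Nat.le_add_right k j, hlt, hx, hy⟩
  · rintro ⟨p, hkp, hlt, hx, hy⟩
    refine ⟨p - k, ?_⟩
    rw [List.drop_drop, Nat.add_sub_cancel' hkp]
    exact (pv_two_prefix_iff cs x y p).mpr ⟨hlt, hx, hy⟩

theorem pv_step_mem (s : List Char) (c : Char) :
    (if c ∈ s then s else s ++ [c]) = PySem.Set.add s c := (PySem.Set.add_eq_ite s c).symm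

theorem pv_step_co (s : List Char) (c : Char) :
    (if c ∈ s then ((s.length : Int)) else ((s.length : Int) + 1)) = ((PySem.Set.add s c).length : Int) := by
  rw [PySem.Set.add_eq_ite]
  split <;> simp

theorem pvALoop_spec (str : String) (h11 : str.toList.length = 11) :
    ∀ (n k t : Nat), n = 10 - k → k ≤ 10 → ((k = 0 ∧ t = 0) ∨ t = k + 1) →
      pvALoop str n (k : Int) 1 ((PySem.Set.ofList (str.toList.take t)).length : Int)
          (PySem.Set.ofList (str.toList.take t))
        = if (List.range' k (10 - k)).all (fun j => !pvCondA str.toList j) then 1 else 0 := by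
  intro n
  induction n with
  | zero =>
    intro k t hn hk ht
    have hk10 : k = 10 := by omega
    subst hk10
    simp [pvALoop]
  | succ m ih =>
    intro k t hn hk ht
    have hklt : k < 10 := by omega
    have hk11 : k < str.toList.length := by omega
    have hk111 : k + 1 < str.toList.length := by omega
    have hcast1 : ((k : Int) + 1) = ((k + 1 : Nat) : Int) := by push_cast; ring
    have hg1 : PySem.Str.pyGet? str (k : Int) = some (pvC str.toList k) := by
      rw [PySem.Str.pyGet?_eq, PySem.Chars.pyGet?_eq_listPyGet?, PySem.List.pyGet?_natCast,
        List.getElem?_eq_getElem hk11, pvC, List.getD_eq_getElem _ _ hk11]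
    have hg2 : PySem.Str.pyGet? str ((k : Int) + 1) = some (pvC str.toList (k + 1)) := by
      rw [hcast1, PySem.Str.pyGet?_eq, PySem.Chars.pyGet?_eq_listPyGet?, PySem.List.pyGet?_natCast,
        List.getElem?_eq_getElem hk111, pvC, List.getD_eq_getElem _ _ hk111]
    have hmem2 : PySem.Set.add (PySem.Set.add (PySem.Set.ofList (str.toList.take t)) (pvC str.toList k))
        (pvC str.toList (k + 1)) = PySem.Set.ofList (str.toList.take (k + 2)) := by
      rcases ht with ⟨rfl, rfl⟩ | rfl
      · rw [show (0 : Nat) + 2 = 0 + 1 + 1 from rfl,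
          pv_ofList_take_succ str.toList (0 + 1) (by omega),
          pv_ofList_take_succ str.toList 0 (by omega)]
        rfl
      · have hmem : pvC str.toList k ∈ PySem.Set.ofList (str.toList.take (k + 1)) := by
          rw [PySem.Set.mem_ofList]
          have hlt : k < (str.toList.take (k + 1)).length := by
            rw [List.length_take]; omega
          have hmem' := List.getElem_mem hlt
          rwa [List.getElem_take, ← List.getD_eq_getElem str.toList ' ' hk11] at hmem'
        rw [PySem.Set.add_of_mem hmem]
        simp only [pvC]
        rw [← pv_ofList_take_succ str.toList (k + 1) hk111]
    have hf1 : ∀ x y : Char,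
        (PySem.Str.findFrom str (String.ofList [x, y]) ((k : Int) + 1) none ≠ -1)
          ↔ [x, y] <:+: str.toList.drop (k + 1) := by
      intro x y
      rw [hcast1, PySem.Str.findFrom_eq, Ne,
        PySem.Chars.findFrom_natCast_eq_neg_one_iff _ _ _ (by omega), not_not]
      simp
    simp only [pvALoop]
    rw [if_pos (show ((k : Int) < 10 ∧ True) from ⟨by exact_mod_cast hklt, trivial⟩)]
    simp only [hg1, hg2, Option.getD_some]
    rw [pv_step_mem, pv_step_co, pv_step_mem, pv_step_co, hmem2]
    have hiff : (PySem.Str.findFrom str (String.ofList [pvC str.toList k, pvC str.toList (k + 1)]) ((k : Int) + 1) none ≠ -1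
          ∨ PySem.Str.findFrom str (String.ofList [pvC str.toList (k + 1), pvC str.toList k]) ((k : Int) + 1) none ≠ -1
          ∨ pvC str.toList k = pvC str.toList (k + 1)
          ∨ ((PySem.Set.ofList (str.toList.take (k + 2))).length : Int) > 5)
        ↔ pvCondA str.toList k = true := by
      rw [pvCondA]
      simp only [Bool.or_eq_true, decide_eq_true_eq, beq_iff_eq]
      rw [hf1, hf1]
      tauto
    by_cases hcond : pvCondA str.toList k = true
    · rw [if_pos (hiff.mpr hcond), pvALoop_test0, ← hn, List.range'_succ]
      simp [hcond]
    · rw [if_neg (fun h => hcond (hiff.mp h)), hcast1,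
        ih (k + 1) (k + 2) (by omega) (by omega) (Or.inr rfl), ← hn, List.range'_succ,
        show 10 - (k + 1) = m by omega]
      rw [Bool.not_eq_true] at hcond
      rw [List.all_cons, hcond, show ∀ b : Bool, (!false && b) = b from fun b => rfl]

theorem a_char (str : String) (h11 : str.toList.length = 11) :
    is_eodermdrome str = if (List.range 10).all (fun j => !pvCondA str.toList j) then 1 else 0 := by
  unfold is_eodermdrome
  rw [if_pos (show PySem.Str.len str = 11 by simp [PySem.Str.len_eq, h11])]
  have h := pvALoop_spec str h11 10 0 0 (by omega) (by omega) (Or.inl ⟨rfl, rfl⟩)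
  simpa [List.range_eq_range'] using h

theorem b_char (str : String) (h11 : str.toList.length = 11) :
    is_eodermdrome_alt str = if pvB1 str.toList && pvB2 str.toList && pvB3 str.toList then 1 else 0 := by
  simp only [is_eodermdrome_alt]
  rw [if_neg (not_ne_iff.mpr h11)]
  have hany : (((List.range 10).map fun i => (str.toList.getD i ' ', str.toList.getD (i + 1) ' ')).any
      fun p => p.1 == p.2) = !pvB1 str.toList := by
    rw [List.any_map, pvB1, Bool.eq_iff_iff]
    simp [List.any_eq_true, pvC, Function.comp]
  have hmap : (((List.range 10).map fun i => (str.toList.getD i ' ', str.toList.getD (i + 1) ' ')).map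
      fun p => pvNormEdge p.1 p.2) = (List.range 10).map (pvEdge str.toList) := by
    rw [List.map_map]; rfl
  rw [hany, hmap]
  have hb2 : (pvB2 str.toList = true) ↔ (PySem.Set.ofList ((List.range 10).map (pvEdge str.toList))).length = 10 := by
    simp [pvB2]
  have hb3 : (pvB3 str.toList = true) ↔ (PySem.Set.ofList str.toList).length ≤ 5 := by
    simp [pvB3]
  cases h1 : pvB1 str.toList
  · simp
  · simp only [Bool.not_true, Bool.false_eq_true, if_false, Bool.true_and]
    by_cases h2 : (PySem.Set.ofList ((List.range 10).map (pvEdge str.toList))).length = 10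
    · rw [if_neg (not_ne_iff.mpr h2)]
      have h2' : pvB2 str.toList = true := hb2.mpr h2
      rw [h2']
      by_cases h3 : (PySem.Set.ofList str.toList).length ≤ 5
      · rw [if_neg (by omega), if_pos (by rw [Bool.true_and]; exact hb3.mpr h3)]
      · rw [if_pos (by omega), if_neg (by simp [hb3]; omega)]
    · have h2' : pvB2 str.toList = false := by
        rw [← Bool.not_eq_true, hb2]; exact h2
      rw [if_pos h2]
      simp [h2']

theorem cond_iff (cs : List Char) (h11 : cs.length = 11) :
    ((List.range 10).all (fun j => !pvCondA cs j)) = (pvB1 cs && pvB2 cs && pvB3 cs) := by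
  have hedge : (PySem.Set.ofList ((List.range 10).map (pvEdge cs))).length = 10
      ↔ ∀ i j, i < j → j < 10 → pvEdge cs i ≠ pvEdge cs j := by
    have h1 : (PySem.Set.ofList ((List.range 10).map (pvEdge cs))).length = 10
        ↔ ((List.range 10).map (pvEdge cs)).Nodup := by
      have h2 := pv_length_ofList_eq_iff ((List.range 10).map (pvEdge cs))
      rwa [show ((List.range 10).map (pvEdge cs)).length = 10 from by simp] at h2
    rw [h1]
    show List.Pairwise (fun a b => a ≠ b) ((List.range 10).map (pvEdge cs)) ↔ _
    rw [List.pairwise_map, List.pairwise_iff_getElem]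
    constructor
    · intro h i j hij hj
      have := h i j (by simpa using lt_trans hij hj) (by simpa using hj) hij
      simpa using this
    · intro h i j hi hj hij
      have := h i j hij (by simpa using hj)
      simpa using this
  have hcondF : ∀ j, (pvCondA cs j = false) ↔
      (¬([pvC cs j, pvC cs (j + 1)] <:+: cs.drop (j + 1))
        ∧ ¬([pvC cs (j + 1), pvC cs j] <:+: cs.drop (j + 1))
        ∧ pvC cs j ≠ pvC cs (j + 1)
        ∧ ¬(((PySem.Set.ofList (cs.take (j + 2))).length : Int) > 5)) := by
    intro j
    simp only [pvCondA, Bool.or_eq_false_iff, decide_eq_false_iff_not, beq_eq_false_iff_ne,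
      not_lt]
    constructor
    · rintro ⟨⟨⟨hA, hB⟩, hC⟩, hD⟩
      exact ⟨hA, hB, hC, by omega⟩
    · rintro ⟨hA, hB, hC, hD⟩
      exact ⟨⟨⟨hA, hB⟩, hC⟩, by omega⟩
  rw [Bool.eq_iff_iff]
  simp only [List.all_eq_true, List.mem_range, Bool.and_eq_true, Bool.not_eq_true']
  constructor
  · intro h
    have hc := fun j hj => (hcondF j).mp (h j hj)
    refine ⟨⟨?_, ?_⟩, ?_⟩
    · simp only [pvB1, List.all_eq_true, List.mem_range, Bool.not_eq_true', beq_eq_false_iff_ne]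
      exact fun j hj => (hc j hj).2.2.1
    · rw [pvB2, decide_eq_true_iff, hedge]
      intro i j hij hj heq
      have hi10 : i < 10 := lt_trans hij hj
      rcases (pvNormEdge_eq_iff _ _ _ _).mp heq with ⟨hx, hy⟩ | ⟨hx, hy⟩
      · exact (hc i hi10).1
          ((pv_two_infix_iff cs _ _ (i + 1)).mpr ⟨j, by omega, by omega, hx.symm, hy.symm⟩)
      · exact (hc i hi10).2.1
          ((pv_two_infix_iff cs _ _ (i + 1)).mpr ⟨j, by omega, by omega, hy.symm, hx.symm⟩)
    · rw [pvB3, decide_eq_true_iff]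
      have h9 := (hc 9 (by omega)).2.2.2
      rw [show (9 : Nat) + 2 = 11 from rfl, List.take_of_length_le (by omega)] at h9
      omega
  · rintro ⟨⟨hb1, hb2⟩, hb3⟩ j hj
    have hs : pvC cs j ≠ pvC cs (j + 1) := by
      simp only [pvB1, List.all_eq_true, List.mem_range, Bool.not_eq_true', beq_eq_false_iff_ne] at hb1
      exact hb1 j hj
    have hedge' := hedge.mp (by simpa [pvB2] using hb2)
    have hlen : (PySem.Set.ofList cs).length ≤ 5 := by simpa [pvB3] using hb3
    rw [hcondF j]
    refine ⟨?_, ?_, hs, ?_⟩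
    · intro hF1
      rcases (pv_two_infix_iff cs _ _ (j + 1)).mp hF1 with ⟨p, hp1, hp2, hx, hy⟩
      have : pvEdge cs j = pvEdge cs p := by
        rw [pvEdge, pvEdge, hx, hy]
      exact hedge' j p (by omega) (by omega) this
    · intro hF2
      rcases (pv_two_infix_iff cs _ _ (j + 1)).mp hF2 with ⟨p, hp1, hp2, hx, hy⟩
      have : pvEdge cs j = pvEdge cs p := by
        rw [pvEdge, pvEdge]
        exact (pvNormEdge_eq_iff _ _ _ _).mpr (Or.inr ⟨hy.symm, hx.symm⟩)
      exact hedge' j p (by omega) (by omega) this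
    · have := pv_length_ofList_take_le cs (j + 2)
      omega

-- ===== VERDICT (by name: the statement is the Claim_ definition above) =====
theorem is_eodermdrome_spec : Claim_equal_is_eodermdrome := by
  intro str _
  unfold Spec_is_eodermdrome
  by_cases h11 : str.toList.length = 11
  · rw [a_char str h11, b_char str h11, cond_iff str.toList h11]
  · have hA : is_eodermdrome str = 0 := by
      unfold is_eodermdrome
      rw [if_neg]
      simp only [PySem.Str.len_eq]
      exact_mod_cast fun h => h11 (by exact_mod_cast h)
    have hB : is_eodermdrome_alt str = 0 := by
      unfold is_eodermdrome_alt
      simp only []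
      rw [if_pos h11]
    rw [hA, hB]
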